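-- pv_equiv track=rewrite | github.com/TessFerrandez/algorithms | greedy/lc-h-630-course-schedule-iii.py | scheduleCourse1
-- ===== SOURCE A (Python) =====
-- from itertools import permutations
-- from typing import List
--
-- def scheduleCourse1(courses: List[List[int]]) -> int:
--     n = len(courses)
--
--     max_courses = 0
--     for permutation in permutations(range(n)):
--         total_time, course_count = 0, 0
--
--         for i in permutation:
--             if total_time + courses[i][0] <= courses[i][1]:
--                 total_time += courses[i][0]
--                 course_count += 1
--             else:
--                 break
--         max_courses = max(max_courses, course_count)
--
--     return max_courses
-- ===== SOURCE B (Python) =====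
-- from typing import List
--
--
-- def scheduleCourse1(courses: List[List[int]]) -> int:
--     # Branching search: at each step try taking any remaining course that still
--     # fits, instead of enumerating whole permutations and replaying prefixes.
--     def best(pre: List[List[int]], suf: List[List[int]], time: int) -> int:
--         if not suf:
--             return 0
--         c, rest = suf[0], suf[1:]
--         if time + c[0] <= c[1]:
--             take = 1 + best([], pre + rest, time + c[0])
--         else:
--             take = 0
--         return max(take, best(pre + [c], rest, time))
--
--     return best([], list(courses), 0)
-- ===== Notes on version B (the rewrite author's own statement) =====
-- stated objective: alternative
-- what changed: A enumerates all n! whole permutations of indices and replays each prefix; B runs a recursive branching search that at each step either takes the next remaining course (if it still fits its deadline) or skips over it, pruning every extension of an infeasible prefix instead of replaying it once per permutation.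
import Mathlib
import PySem

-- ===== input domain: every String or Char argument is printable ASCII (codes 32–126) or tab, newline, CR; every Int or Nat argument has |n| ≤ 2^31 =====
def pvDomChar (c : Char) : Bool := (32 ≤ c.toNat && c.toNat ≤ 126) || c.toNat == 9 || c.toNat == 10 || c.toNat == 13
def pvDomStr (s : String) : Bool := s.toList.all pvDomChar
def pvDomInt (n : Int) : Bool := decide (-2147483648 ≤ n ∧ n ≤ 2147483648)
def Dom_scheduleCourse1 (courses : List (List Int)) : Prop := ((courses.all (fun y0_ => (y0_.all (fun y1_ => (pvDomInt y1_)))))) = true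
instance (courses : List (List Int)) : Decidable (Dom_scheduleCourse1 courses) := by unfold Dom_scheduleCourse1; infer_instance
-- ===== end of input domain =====

-- B replaces A's enumeration of all n! whole permutations by a recursive branching
-- search (take the next still-fitting course or skip it), pruning infeasible
-- prefixes; alternative algorithm, same return value.

-- ===== PORT A =====
-- inner 'for i in permutation: … break' loop of A, carrying total_time and course_count
def pvRunA (courses : List (List Int)) : List Int → Int → Int → Int
  | [], _, count => count
  | i :: rest, time, count =>
    let c := PySem.List.pyGetD courses i []
    if time + PySem.List.pyGetD c 0 0 ≤ PySem.List.pyGetD c 1 0 then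
      pvRunA courses rest (time + PySem.List.pyGetD c 0 0) (count + 1)
    else count

def scheduleCourse1 (courses : List (List Int)) : Int :=
  let n := courses.length
  let base := PySem.List.pyRange 0 (n : Int) 1
  (PySem.List.permutations base base.length).foldl
    (fun mx p => max mx (pvRunA courses p 0 0)) 0

-- ===== PORT B =====
-- B's best(pre, suf, time): either take suf's head course (when it fits its
-- deadline) and recurse on everything else, or skip it to pre and move on.
def pvBest : List (List Int) → List (List Int) → Int → Int
  | _, [], _ => 0
  | pre, c :: rest, time =>
    max (if time + PySem.List.pyGetD c 0 0 ≤ PySem.List.pyGetD c 1 0 then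
           1 + pvBest [] (pre ++ rest) (time + PySem.List.pyGetD c 0 0)
         else 0)
        (pvBest (pre ++ [c]) rest time)
termination_by pre suf _ => (pre.length + suf.length, suf.length)
decreasing_by
  all_goals simp [Prod.lex_iff]
  omega

def scheduleCourse1_alt (courses : List (List Int)) : Int := pvBest [] courses 0

-- ===== PRECONDITION & SPEC =====
-- Pre_ excludes exactly the inputs where Python A raises IndexError: an inner
-- course list with fewer than two entries (A reads courses[i][0] and courses[i][1]).
def Pre_scheduleCourse1 (courses : List (List Int)) : Prop :=
  ∀ c ∈ courses, 2 ≤ c.length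
instance (courses : List (List Int)) : Decidable (Pre_scheduleCourse1 courses) := by
  unfold Pre_scheduleCourse1; infer_instance

def pvWitness_scheduleCourse1 : List (List Int) := [[100, 200], [200, 1300], [1000, 1250]]

def Spec_scheduleCourse1 (courses : List (List Int)) (out : Int) : Prop := out = scheduleCourse1_alt courses
instance (courses : List (List Int)) (out : Int) : Decidable (Spec_scheduleCourse1 courses out) := by unfold Spec_scheduleCourse1; infer_instance

-- ===== CLAIM (what is proved, stated in full; the proofs are below) =====
def Claim_equal_scheduleCourse1 : Prop := ∀ (courses : List (List Int)), Dom_scheduleCourse1 courses → Pre_scheduleCourse1 courses → Spec_scheduleCourse1 courses (scheduleCourse1 courses)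

-- ===== LEMMAS AND PROOFS =====

-- A's prefix count, expressed directly on a list of courses (no index lookup)
def pvCount : List (List Int) → Int → Int
  | [], _ => 0
  | c :: rest, time =>
    if time + PySem.List.pyGetD c 0 0 ≤ PySem.List.pyGetD c 1 0 then
      1 + pvCount rest (time + PySem.List.pyGetD c 0 0)
    else 0

lemma pvCount_nonneg (m : List (List Int)) (time : Int) : 0 ≤ pvCount m time := by
  induction m generalizing time with
  | nil => simp [pvCount]
  | cons c rest ih =>
    simp only [pvCount]
    split
    · have := ih (time + PySem.List.pyGetD c 0 0); omega
    · omega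

lemma pvBest_nonneg (suf : List (List Int)) : ∀ (pre : List (List Int)) (time : Int),
    0 ≤ pvBest pre suf time := by
  induction suf with
  | nil => intro pre time; simp [pvBest]
  | cons c rest ih =>
    intro pre time
    rw [pvBest]
    exact le_max_of_le_right (ih _ _)

lemma pvRunA_eq_count (courses : List (List Int)) (p : List Int) :
    ∀ (time count : Int), pvRunA courses p time count
      = count + pvCount (p.map (fun i => PySem.List.pyGetD courses i [])) time := by
  induction p with
  | nil => intro time count; simp [pvRunA, pvCount]
  | cons i rest ih =>
    intro time count
    simp only [pvRunA, pvCount, List.map_cons]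
    split
    · rw [ih]; ring
    · ring

-- skipping courses into pre never increases B's value
lemma pvBest_append_le (xs : List (List Int)) :
    ∀ pre rest time, pvBest (pre ++ xs) rest time ≤ pvBest pre (xs ++ rest) time := by
  induction xs with
  | nil => intro pre rest time; simp
  | cons x xs ih =>
    intro pre rest time
    calc pvBest (pre ++ x :: xs) rest time
        = pvBest ((pre ++ [x]) ++ xs) rest time := by simp
      _ ≤ pvBest (pre ++ [x]) (xs ++ rest) time := ih _ _ _
      _ ≤ pvBest pre (x :: (xs ++ rest)) time := by rw [pvBest]; exact le_max_right _ _
      _ = pvBest pre ((x :: xs) ++ rest) time := rfl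

-- any feasible-prefix count of a rearrangement is at most B's value
lemma pvCount_le_pvBest (m : List (List Int)) :
    ∀ cs time, m.Perm cs → pvCount m time ≤ pvBest [] cs time := by
  induction m with
  | nil => intro cs time _; exact pvBest_nonneg _ _ _
  | cons c m' ih =>
    intro cs time h
    have hc : c ∈ cs := h.mem_iff.mp (List.mem_cons_self ..)
    obtain ⟨xs, ys, rfl⟩ := List.append_of_mem hc
    have hm' : m'.Perm (xs ++ ys) := (h.trans List.perm_middle).cons_inv
    simp only [pvCount]
    split
    · next hfit =>
      have h1 := ih (xs ++ ys) (time + PySem.List.pyGetD c 0 0) hm'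
      refine le_trans (show _ ≤ 1 + pvBest [] (xs ++ ys) (time + PySem.List.pyGetD c 0 0) by omega) ?_
      calc 1 + pvBest [] (xs ++ ys) (time + PySem.List.pyGetD c 0 0)
          = (if time + PySem.List.pyGetD c 0 0 ≤ PySem.List.pyGetD c 1 0 then
               1 + pvBest [] (xs ++ ys) (time + PySem.List.pyGetD c 0 0) else 0) := by
            rw [if_pos hfit]
        _ ≤ pvBest xs (c :: ys) time := by rw [pvBest]; exact le_max_left _ _
        _ ≤ pvBest [] (xs ++ c :: ys) time := by simpa using pvBest_append_le xs [] (c :: ys) time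
    · exact pvBest_nonneg _ _ _

-- B's value is witnessed by some rearrangement
lemma pvBest_witness (N : Nat) :
    ∀ suf pre (time : Int), pre.length + suf.length ≤ N →
      ∃ m : List (List Int), m.Perm (pre ++ suf) ∧ pvBest pre suf time ≤ pvCount m time := by
  induction N with
  | zero =>
    intro suf pre time h
    have hs : suf = [] := by
      cases suf with
      | nil => rfl
      | cons a b => simp at h
    subst hs
    exact ⟨pre, by simp, by rw [pvBest]; exact pvCount_nonneg _ _⟩
  | succ N ihN =>
    intro suf
    induction suf with
    | nil =>
      intro pre time _
      exact ⟨pre, by simp, by rw [pvBest]; exact pvCount_nonneg _ _⟩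
    | cons c rest ihS =>
      intro pre time h
      obtain ⟨m2, hm2p, hm2⟩ := ihS (pre ++ [c]) time (by simp at h ⊢; omega)
      have hm2p' : m2.Perm (pre ++ c :: rest) := by simpa using hm2p
      rw [pvBest]
      by_cases hfit : time + PySem.List.pyGetD c 0 0 ≤ PySem.List.pyGetD c 1 0
      · obtain ⟨m1, hm1p, hm1⟩ :=
          ihN (pre ++ rest) [] (time + PySem.List.pyGetD c 0 0) (by simp at h ⊢; omega)
        rcases le_total (1 + pvBest [] (pre ++ rest) (time + PySem.List.pyGetD c 0 0))
            (pvBest (pre ++ [c]) rest time) with hle | hle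
        · exact ⟨m2, hm2p', by rw [if_pos hfit]; exact max_le (le_trans hle hm2) hm2⟩
        · refine ⟨c :: m1, ?_, ?_⟩
          · have h0 : m1.Perm (pre ++ rest) := by simpa using hm1p
            exact (h0.cons c).trans List.perm_middle.symm
          · rw [if_pos hfit]
            have hv : pvCount (c :: m1) time
                = 1 + pvCount m1 (time + PySem.List.pyGetD c 0 0) := by
              simp only [pvCount]; rw [if_pos hfit]
            rw [hv]
            exact max_le (by omega) (by omega)
      · refine ⟨m2, hm2p', ?_⟩
        rw [if_neg hfit]
        exact max_le (le_trans (pvBest_nonneg _ _ _) hm2) hm2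

-- generic fold-max facts for A's outer loop
lemma foldl_max_init_le {α : Type} (f : α → Int) (L : List α) :
    ∀ init : Int, init ≤ L.foldl (fun mx p => max mx (f p)) init := by
  induction L with
  | nil => intro init; simp
  | cons a L ih =>
    intro init
    simp only [List.foldl_cons]
    exact le_trans (le_max_left _ _) (ih _)

lemma foldl_max_le {α : Type} (f : α → Int) (B : Int) (L : List α) :
    ∀ init : Int, (∀ p ∈ L, f p ≤ B) → init ≤ B →
      L.foldl (fun mx p => max mx (f p)) init ≤ B := by
  induction L with
  | nil => intro init _ h0; simpa using h0
  | cons a L ih =>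
    intro init h h0
    simp only [List.foldl_cons]
    exact ih _ (fun p hp => h p (List.mem_cons_of_mem _ hp))
      (max_le h0 (h a (List.mem_cons_self ..)))

lemma le_foldl_max {α : Type} (f : α → Int) (L : List α) :
    ∀ (init : Int) (p : α), p ∈ L → f p ≤ L.foldl (fun mx q => max mx (f q)) init := by
  induction L with
  | nil => intro init p hp; simp at hp
  | cons a L ih =>
    intro init p hp
    simp only [List.foldl_cons]
    rcases List.mem_cons.mp hp with rfl | hp
    · exact le_trans (le_max_right _ _) (foldl_max_init_le f L _)
    · exact ih _ _ hp

-- every rearrangement of (map f l) is the map of a rearrangement of l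
lemma exists_perm_of_perm_map {α β : Type} (f : α → β) :
    ∀ (u m : List β), u.Perm m → ∀ l : List α, u = l.map f →
      ∃ l' : List α, l.Perm l' ∧ l'.map f = m := by
  intro u m h
  induction h with
  | nil =>
    intro l hl
    exact ⟨l, List.Perm.refl _, hl.symm⟩
  | cons x h ih =>
    intro l hl
    cases l with
    | nil => simp at hl
    | cons a l0 =>
      simp only [List.map_cons, List.cons.injEq] at hl
      obtain ⟨rfl, hl0⟩ := hl
      obtain ⟨l0', hp, hm⟩ := ih l0 hl0
      exact ⟨a :: l0', hp.cons a, by simp [hm]⟩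
  | swap x y t =>
    intro l hl
    match l, hl with
    | a :: b :: l0, hl =>
      simp only [List.map_cons, List.cons.injEq] at hl
      obtain ⟨rfl, rfl, hl0⟩ := hl
      exact ⟨b :: a :: l0, List.Perm.swap b a l0, by simp [hl0]⟩
  | trans h1 h2 ih1 ih2 =>
    intro l hl
    obtain ⟨l1, hp1, hm1⟩ := ih1 l hl
    obtain ⟨l2, hp2, hm2⟩ := ih2 l1 hm1.symm
    exact ⟨l2, hp1.trans hp2, hm2⟩

-- membership converse for PySem's permutations at full length
lemma mem_permutations_of_perm {α : Type} (p : List α) :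
    ∀ base : List α, p.Perm base → p ∈ PySem.List.permutations base base.length := by
  induction p with
  | nil =>
    intro base h
    have : base = [] := h.symm.eq_nil
    subst this
    simp [PySem.List.permutations_zero]
  | cons a p' ih =>
    intro base h
    have ha : a ∈ base := h.mem_iff.mp (List.mem_cons_self ..)
    obtain ⟨l1, l2, rfl⟩ := List.append_of_mem ha
    have hp' : p'.Perm (l1 ++ l2) := (h.trans List.perm_middle).cons_inv
    have hlen : (l1 ++ a :: l2).length = (l1.length + l2.length) + 1 := by simp; omega
    rw [hlen, PySem.List.permutations]
    apply List.mem_flatMap.mpr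
    refine ⟨l1.length, by simp, ?_⟩
    have hget : (l1 ++ a :: l2)[l1.length]? = some a := by
      rw [List.getElem?_append_right (le_refl _)]
      simp
    rw [hget]
    have herase : (l1 ++ a :: l2).eraseIdx l1.length = l1 ++ l2 := by
      rw [List.eraseIdx_append]
      simp
    simp only [herase]
    apply List.mem_map.mpr
    refine ⟨p', ?_, rfl⟩
    have : (l1 ++ l2).length = l1.length + l2.length := by simp
    simpa [this] using ih (l1 ++ l2) hp'

lemma map_getD_base (courses : List (List Int)) :
    (PySem.List.pyRange 0 (courses.length : Int) 1).map
      (fun i => PySem.List.pyGetD courses i []) = courses :=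
  PySem.List.map_pyGetD_pyRange_zero' courses []

lemma pvPorts_eq (courses : List (List Int)) :
    scheduleCourse1 courses = scheduleCourse1_alt courses := by
  unfold scheduleCourse1 scheduleCourse1_alt
  show (PySem.List.permutations (PySem.List.pyRange 0 (courses.length : Int) 1)
          (PySem.List.pyRange 0 (courses.length : Int) 1).length).foldl
        (fun mx p => max mx (pvRunA courses p 0 0)) 0 = pvBest [] courses 0
  have hmap := map_getD_base courses
  apply le_antisymm
  · apply foldl_max_le
    · intro p hp
      have hperm : p.Perm (PySem.List.pyRange 0 (courses.length : Int) 1) :=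
        PySem.List.perm_of_mem_permutations hp
      have hpc : (p.map (fun i => PySem.List.pyGetD courses i [])).Perm courses := by
        have h0 := hperm.map (fun i => PySem.List.pyGetD courses i [])
        rwa [hmap] at h0
      rw [pvRunA_eq_count]
      have := pvCount_le_pvBest _ _ 0 hpc
      omega
    · exact pvBest_nonneg _ _ _
  · obtain ⟨m, hmp, hm⟩ := pvBest_witness courses.length courses [] 0 (by simp)
    have hmp' : m.Perm ((PySem.List.pyRange 0 (courses.length : Int) 1).map
        (fun i => PySem.List.pyGetD courses i [])) := by
      rw [hmap]
      simpa using hmp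
    obtain ⟨p, hbp, hpm⟩ :=
      exists_perm_of_perm_map (fun i => PySem.List.pyGetD courses i []) _ m hmp'.symm
        (PySem.List.pyRange 0 (courses.length : Int) 1) rfl
    have hmem : p ∈ PySem.List.permutations (PySem.List.pyRange 0 (courses.length : Int) 1)
        (PySem.List.pyRange 0 (courses.length : Int) 1).length :=
      mem_permutations_of_perm p _ hbp.symm
    have hval : pvRunA courses p 0 0 = pvCount m 0 := by
      rw [pvRunA_eq_count, hpm]; ring
    calc pvBest [] courses 0 ≤ pvCount m 0 := hm
      _ = pvRunA courses p 0 0 := hval.symm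
      _ ≤ _ := le_foldl_max _ _ 0 p hmem

-- ===== VERDICT (by name: the statement is the Claim_ definition above) =====
theorem scheduleCourse1_spec : Claim_equal_scheduleCourse1 := by
  intro courses _ _
  unfold Spec_scheduleCourse1
  exact pvPorts_eq courses
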